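-- pv_equiv track=rewrite | github.com/jitesh2110/RepoCorrector | refactor_engine.py | refactor_code
-- ===== SOURCE A (Python) =====
-- def refactor_code(code, analysis):
--
--     components = ""
--     hooks = ""
--     services = ""
--
--     lines = code.split("\n")
--
--     for line in lines:
--
--         if "fetch(" in line or "axios" in line:
--             services += line + "\n"
--
--         elif "useState" in line or "useEffect" in line:
--             hooks += line + "\n"
--
--         else:
--             components += line + "\n"
--
--     return {
--         "components": components,
--         "hooks": hooks,
--         "services": services
--     }
-- ===== SOURCE B (Python) =====
-- def _is_service(line):
--     return "fetch(" in line or "axios" in line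
--
--
-- def _is_hook(line):
--     return "useState" in line or "useEffect" in line
--
--
-- def refactor_code(code, analysis):
--     lines = code.split("\n")
--     services = "".join(l + "\n" for l in lines if _is_service(l))
--     hooks = "".join(l + "\n" for l in lines if _is_hook(l) and not _is_service(l))
--     components = "".join(l + "\n" for l in lines if not _is_service(l) and not _is_hook(l))
--     return {
--         "components": components,
--         "hooks": hooks,
--         "services": services
--     }
-- ===== Notes on version B (the rewrite author's own statement) =====
-- stated objective: alternative
-- what changed: Replaces the single stateful pass with three string accumulators by three independent filter-and-join scans over the line list, encoding the elif priority as predicate exclusion in the filters.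
import Mathlib
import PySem

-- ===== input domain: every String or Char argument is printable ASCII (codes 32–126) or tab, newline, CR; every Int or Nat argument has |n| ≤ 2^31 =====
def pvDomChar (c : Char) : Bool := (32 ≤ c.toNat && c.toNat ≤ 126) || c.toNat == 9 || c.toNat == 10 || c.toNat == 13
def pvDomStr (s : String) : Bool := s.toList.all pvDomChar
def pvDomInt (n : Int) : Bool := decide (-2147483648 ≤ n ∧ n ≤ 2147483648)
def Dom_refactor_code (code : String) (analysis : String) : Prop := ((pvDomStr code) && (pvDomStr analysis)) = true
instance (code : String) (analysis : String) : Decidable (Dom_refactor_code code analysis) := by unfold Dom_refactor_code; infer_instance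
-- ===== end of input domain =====

-- B replaces A's single stateful pass by three independent filter-and-join scans (alternative decomposition, same cost).

-- ===== PORT A =====
-- '"fetch(" in line or "axios" in line'
def pvSvc (line : String) : Bool := PySem.Str.isIn "fetch(" line || PySem.Str.isIn "axios" line
-- '"useState" in line or "useEffect" in line'
def pvHook (line : String) : Bool := PySem.Str.isIn "useState" line || PySem.Str.isIn "useEffect" line

def refactor_code (code : String) (analysis : String) : List (String × String) :=
  -- lines = code.split("\n"); sep = "\n" ≠ "" so split? is always `some`
  let lines := (PySem.Str.split? code "\n").getD []
  -- the loop accumulating (components, hooks, services)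
  let st := lines.foldl (fun (st : String × String × String) line =>
      if pvSvc line then (st.1, st.2.1, st.2.2 ++ line ++ "\n")
      else if pvHook line then (st.1, st.2.1 ++ line ++ "\n", st.2.2)
      else (st.1 ++ line ++ "\n", st.2.1, st.2.2)) ("", "", "")
  [("components", st.1), ("hooks", st.2.1), ("services", st.2.2)]

-- ===== PORT B =====
-- '"".join(l + "\n" for l in lines)'
def pvJoinNl (lines : List String) : String := PySem.Str.join "" (lines.map (fun l => l ++ "\n"))

def refactor_code_alt (code : String) (analysis : String) : List (String × String) :=
  let lines := (PySem.Str.split? code "\n").getD []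
  let services := pvJoinNl (lines.filter (fun l => pvSvc l))
  let hooks := pvJoinNl (lines.filter (fun l => pvHook l && !pvSvc l))
  let components := pvJoinNl (lines.filter (fun l => !pvSvc l && !pvHook l))
  [("components", components), ("hooks", hooks), ("services", services)]

-- ===== PRECONDITION & SPEC =====
def Spec_refactor_code (code : String) (analysis : String) (out : List (String × String)) : Prop := out = refactor_code_alt code analysis
instance (code : String) (analysis : String) (out : List (String × String)) : Decidable (Spec_refactor_code code analysis out) := by unfold Spec_refactor_code; infer_instance

-- ===== CLAIM (what is proved, stated in full; the proofs are below) =====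
def Claim_equal_refactor_code : Prop := ∀ (code : String) (analysis : String), Dom_refactor_code code analysis → Spec_refactor_code code analysis (refactor_code code analysis)

-- ===== LEMMAS AND PROOFS =====

theorem pvJoinNl_nil : pvJoinNl [] = "" := by
  simp [pvJoinNl, PySem.Str.join]

theorem chars_join_nil_cons (a : List Char) (rest : List (List Char)) :
    PySem.Chars.join [] (a :: rest) = a ++ PySem.Chars.join [] rest := by
  cases rest with
  | nil => simp [PySem.Chars.join_singleton, PySem.Chars.join_nil]
  | cons b r => rw [PySem.Chars.join_cons_cons]; simp

theorem pvJoinNl_cons (l : String) (xs : List String) :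
    pvJoinNl (l :: xs) = l ++ "\n" ++ pvJoinNl xs := by
  apply String.toList_inj.mp
  simp [pvJoinNl, PySem.Str.toList_join, chars_join_nil_cons]

theorem refactor_loop_eq (lines : List String) (c h s : String) :
    lines.foldl (fun (st : String × String × String) line =>
      if pvSvc line then (st.1, st.2.1, st.2.2 ++ line ++ "\n")
      else if pvHook line then (st.1, st.2.1 ++ line ++ "\n", st.2.2)
      else (st.1 ++ line ++ "\n", st.2.1, st.2.2)) (c, h, s)
    = (c ++ pvJoinNl (lines.filter (fun l => !pvSvc l && !pvHook l)),
       h ++ pvJoinNl (lines.filter (fun l => pvHook l && !pvSvc l)),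
       s ++ pvJoinNl (lines.filter (fun l => pvSvc l))) := by
  induction lines generalizing c h s with
  | nil => simp [pvJoinNl_nil]
  | cons l rest ih =>
    rw [List.foldl_cons]
    by_cases hs : pvSvc l = true
    · simp only [hs, if_true]
      rw [ih]
      simp [pvJoinNl_cons, String.append_assoc, hs]
    · by_cases hh : pvHook l = true
      · simp only [hs, hh, if_true, if_false]
        rw [ih]
        simp [pvJoinNl_cons, String.append_assoc, hs, hh]
      · simp only [hs, hh, if_true, if_false]
        rw [ih]
        simp [pvJoinNl_cons, String.append_assoc, hs, hh]

-- ===== VERDICT (by name: the statement is the Claim_ definition above) =====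
theorem refactor_code_spec : Claim_equal_refactor_code := by
  intro code analysis _
  unfold Spec_refactor_code refactor_code refactor_code_alt
  simp only [refactor_loop_eq]
  simp
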